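-- pv_equiv track=rewrite | github.com/relastle/vim-nayvy | python3/pydra/models/imprt.py | get_import_block_indices
-- ===== SOURCE A (Python) =====
-- from typing import List, Tuple, Optional
--
-- def get_import_block_indices(lines: List[str]) -> List[Tuple[int, int]]:
--     '''
--     Returns:
--         [
--             (1st block's start begin(inclusive), 1st block's end(exclusive)),
--             (2nd block's start begin(inclusive), 2nd block's end(exclusive)),
--             (3rd block's start begin(inclusive), 3rd block's end(exclusive)),
--             ]
--     '''
--     res = []
--     in_block = False
--     try:
--         for i, line in enumerate(lines):
--             if (
--                 not in_block and
--                 (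
--                     line.startswith('import ') or
--                     line.startswith('from ')
--                 )
--             ):
--                 in_block = True
--                 start_index = i
--                 continue
--             elif in_block and line == '':
--                 in_block = False
--                 res.append((start_index, i))
--     except Exception:
--         return res
--     return res
-- ===== SOURCE B (Python) =====
-- def get_import_block_indices(lines):
--     # Staged approach: precompute the index lists of block-start lines and of
--     # empty lines, then pair each start with the first empty line after it,
--     # skipping starts swallowed by an earlier block via a cursor.
--     starts = [i for i, line in enumerate(lines)
--               if line.startswith('import ') or line.startswith('from ')]
--     empties = [i for i, line in enumerate(lines) if line == '']
--     res = []
--     cursor = 0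
--     for s in starts:
--         if s < cursor:
--             continue
--         e = next((e for e in empties if e > s), None)
--         if e is None:
--             break
--         res.append((s, e))
--         cursor = e + 1
--     return res
-- ===== Notes on version B (the rewrite author's own statement) =====
-- stated objective: alternative
-- what changed: Replaced A's single-pass boolean-flag state machine with a staged approach: two comprehension passes precompute the index lists of import-start lines and of empty lines, then a pairing loop matches each start (not swallowed by a previous block, tracked with a cursor) with the first empty line after it.
import Mathlib
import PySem

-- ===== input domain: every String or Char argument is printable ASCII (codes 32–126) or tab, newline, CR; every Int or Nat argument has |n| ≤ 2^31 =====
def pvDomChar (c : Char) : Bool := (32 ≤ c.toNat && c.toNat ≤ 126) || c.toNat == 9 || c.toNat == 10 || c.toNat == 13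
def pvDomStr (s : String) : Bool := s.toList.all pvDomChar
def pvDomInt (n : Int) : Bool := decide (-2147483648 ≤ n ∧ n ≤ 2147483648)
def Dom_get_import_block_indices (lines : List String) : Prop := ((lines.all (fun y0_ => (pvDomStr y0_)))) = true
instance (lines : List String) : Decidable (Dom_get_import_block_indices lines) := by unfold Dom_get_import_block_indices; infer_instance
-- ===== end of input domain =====

-- B replaces A's boolean-flag state machine with staged passes: precomputed index lists of start/empty lines, then a pairing loop (alternative decomposition; not faster).


-- ===== PORT A =====
-- A's for-loop over enumerate(lines) with state (res, in_block, start_index);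
-- in_block/start_index are carried as Option Nat (some s = in_block with start s).
def goA : List String → Nat → Option Nat → List (Int × Int) → List (Int × Int)
  | [], _, _, res => res
  | line :: rest, i, none, res =>
      if PySem.Str.startswith line "import " || PySem.Str.startswith line "from " then
        goA rest (i + 1) (some i) res
      else
        goA rest (i + 1) none res
  | line :: rest, i, some s, res =>
      if line = "" then
        goA rest (i + 1) none (res ++ [((s : Int), (i : Int))])
      else
        goA rest (i + 1) (some s) res

def get_import_block_indices (lines : List String) : List (Int × Int) :=
  goA lines 0 none []

-- ===== PORT B =====
-- first comprehension pass: indices of lines starting an import block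
def startsOf : List String → Nat → List Nat
  | [], _ => []
  | line :: rest, i =>
      if PySem.Str.startswith line "import " || PySem.Str.startswith line "from " then
        i :: startsOf rest (i + 1)
      else startsOf rest (i + 1)

-- second comprehension pass: indices of empty lines
def emptiesOf : List String → Nat → List Nat
  | [], _ => []
  | line :: rest, i =>
      if line = "" then i :: emptiesOf rest (i + 1) else emptiesOf rest (i + 1)

-- pairing loop over the starts list with cursor; 'next((e for e in empties if e > s), None)' is List.find?
def consume : List Nat → List Nat → Nat → List (Int × Int)
  | [], _, _ => []
  | s :: rest, empties, cursor =>
      if s < cursor then consume rest empties cursor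
      else
        match empties.find? (fun e => decide (s < e)) with
        | none => []
        | some e => ((s : Int), (e : Int)) :: consume rest empties (e + 1)

def get_import_block_indices_alt (lines : List String) : List (Int × Int) :=
  consume (startsOf lines 0) (emptiesOf lines 0) 0

-- ===== PRECONDITION & SPEC =====
def Spec_get_import_block_indices (lines : List String) (out : List (Int × Int)) : Prop := out = get_import_block_indices_alt lines
instance (lines : List String) (out : List (Int × Int)) : Decidable (Spec_get_import_block_indices lines out) := by unfold Spec_get_import_block_indices; infer_instance

-- ===== CLAIM (what is proved, stated in full; the proofs are below) =====
def Claim_equal_get_import_block_indices : Prop := ∀ (lines : List String), Dom_get_import_block_indices lines → Spec_get_import_block_indices lines (get_import_block_indices lines)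

-- ===== LEMMAS AND PROOFS =====

-- membership characterisation of the empty-line index list
theorem mem_emptiesOf (l : List String) : ∀ (j k : Nat),
    k ∈ emptiesOf l j ↔ ∃ d, d < l.length ∧ k = j + d ∧ l.getD d "?" = "" := by
  induction l with
  | nil => intro j k; simp [emptiesOf]
  | cons x rest ih =>
    intro j k
    simp only [emptiesOf]
    by_cases hx : x = ""
    · rw [if_pos hx]
      simp only [List.mem_cons, ih (j + 1) k]
      constructor
      · rintro (rfl | ⟨d, hd, rfl, hget⟩)
        · exact ⟨0, by simp, by omega, by simp [hx]⟩
        · exact ⟨d + 1, by simp; omega, by omega, by simpa using hget⟩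
      · rintro ⟨d, hd, rfl, hget⟩
        cases d with
        | zero => left; omega
        | succ d =>
            right; exact ⟨d, by simp at hd; omega, by omega, by simpa using hget⟩
    · rw [if_neg hx, ih (j + 1) k]
      constructor
      · rintro ⟨d, hd, rfl, hget⟩
        exact ⟨d + 1, by simp; omega, by omega, by simpa using hget⟩
      · rintro ⟨d, hd, rfl, hget⟩
        cases d with
        | zero => simp at hget; exact absurd hget hx
        | succ d => exact ⟨d, by simp at hd; omega, by omega, by simpa using hget⟩

theorem mem_empties_iff (lines : List String) (k : Nat) :
    k ∈ emptiesOf lines 0 ↔ k < lines.length ∧ lines.getD k "?" = "" := by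
  rw [mem_emptiesOf]
  constructor
  · rintro ⟨d, hd, rfl, hget⟩; exact ⟨by omega, by simpa using hget⟩
  · rintro ⟨hk, hget⟩; exact ⟨k, hk, by omega, hget⟩

theorem pairwise_emptiesOf (l : List String) : ∀ j, List.Pairwise (· < ·) (emptiesOf l j) := by
  induction l with
  | nil => intro j; simp [emptiesOf]
  | cons x rest ih =>
    intro j
    simp only [emptiesOf]
    split
    · refine List.Pairwise.cons ?_ (ih (j + 1))
      intro i hi
      have := (mem_emptiesOf rest (j + 1) i).1 hi
      omega
    · exact ih (j + 1)

theorem startsOf_ge (l : List String) : ∀ j i, i ∈ startsOf l j → j ≤ i := by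
  induction l with
  | nil => intro j i h; simp [startsOf] at h
  | cons x rest ih =>
    intro j i h
    simp only [startsOf] at h
    split at h
    · rcases List.mem_cons.1 h with rfl | h'
      · exact le_refl i
      · have := ih (j + 1) i h'; omega
    · have := ih (j + 1) i h; omega

-- on a strictly increasing list, the first element above st is the least member above st
theorem find?_first (st k : Nat) : ∀ (E : List Nat),
    List.Pairwise (· < ·) E → k ∈ E → st < k → (∀ d ∈ E, st < d → ¬ d < k) →
    E.find? (fun e => decide (st < e)) = some k := by
  intro E
  induction E with
  | nil => intro _ hm; simp at hm
  | cons h t ih =>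
    intro hp hm hst hd
    by_cases hh : st < h
    · rw [List.find?_cons_of_pos (by simpa using hh)]
      rcases List.mem_cons.1 hm with rfl | hmt
      · rfl
      · exact absurd ((List.pairwise_cons.1 hp).1 k hmt)
          (hd h (List.mem_cons_self) hh)
    · rw [List.find?_cons_of_neg (by simpa using hh)]
      have hk : k ∈ t := by
        rcases List.mem_cons.1 hm with rfl | hmt
        · exact absurd hst hh
        · exact hmt
      exact ih (List.pairwise_cons.1 hp).2 hk hst
        (fun d hdm => hd d (List.mem_cons_of_mem _ hdm))

theorem consume_cons_lt (s : Nat) (t E : List Nat) (c : Nat) (h : s < c) :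
    consume (s :: t) E c = consume t E c := by
  simp [consume, h]

theorem consume_cons_ge (s : Nat) (t E : List Nat) (c : Nat) (h : ¬ s < c) :
    consume (s :: t) E c =
      match E.find? (fun e => decide (s < e)) with
      | none => []
      | some e => ((s : Int), (e : Int)) :: consume t E (e + 1) := by
  simp [consume, h]

theorem consume_cursor_irrel (S E : List Nat) (c c' : Nat)
    (h : ∀ s ∈ S, ¬ s < c) (h' : ∀ s ∈ S, ¬ s < c') :
    consume S E c = consume S E c' := by
  cases S with
  | nil => rfl
  | cons s t =>
      rw [consume_cons_ge s t E c (h s (List.mem_cons_self)),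
          consume_cons_ge s t E c' (h' s (List.mem_cons_self))]

-- B's pending-block continuation while A is in in_block state with start st at scan position k
def tailB (lines : List String) (st k : Nat) : List (Int × Int) :=
  match (emptiesOf lines 0).find? (fun e => decide (st < e)) with
  | none => []
  | some e => ((st : Int), (e : Int)) :: consume (startsOf (lines.drop k) k) (emptiesOf lines 0) (e + 1)

theorem main_inv (lines : List String) (m : Nat) : ∀ (k : Nat) (res : List (Int × Int)),
    lines.length - k ≤ m →
    (goA (lines.drop k) k none res =
        res ++ consume (startsOf (lines.drop k) k) (emptiesOf lines 0) k) ∧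
    (∀ st, st < k → (∀ d ∈ emptiesOf lines 0, st < d → ¬ d < k) →
        goA (lines.drop k) k (some st) res = res ++ tailB lines st k) := by
  induction m with
  | zero =>
      intro k res hk
      have hge : lines.length ≤ k := by omega
      have hdrop : lines.drop k = [] := List.drop_eq_nil_of_le hge
      constructor
      · rw [hdrop]; simp [goA, startsOf, consume]
      · intro st hst hd
        rw [hdrop]
        have hfind : (emptiesOf lines 0).find? (fun e => decide (st < e)) = none := by
          rw [List.find?_eq_none]
          intro e he
          have hlt : e < lines.length := ((mem_empties_iff lines e).1 he).1
          simp only [decide_eq_true_eq]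
          intro hste
          exact hd e he hste (by omega)
        simp [goA, tailB, hfind]
  | succ m ih =>
      intro k res hk
      by_cases hlt : k < lines.length
      · have hdrop : lines.drop k = lines[k] :: lines.drop (k + 1) :=
          List.drop_eq_getElem_cons hlt
        have hm : lines.length - (k + 1) ≤ m := by omega
        constructor
        · -- none state
          rw [hdrop]
          by_cases hs : (PySem.Str.startswith lines[k] "import " ||
                          PySem.Str.startswith lines[k] "from ") = true
          · rw [show goA (lines[k] :: lines.drop (k + 1)) k none res
                  = goA (lines.drop (k + 1)) (k + 1) (some k) res by
                simp only [goA]; rw [if_pos hs]]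
            rw [(ih (k + 1) res hm).2 k (by omega) (by intro d _ _; omega)]
            have hstart : startsOf (lines[k] :: lines.drop (k + 1)) k
                = k :: startsOf (lines.drop (k + 1)) (k + 1) := by
              simp only [startsOf]; rw [if_pos hs]
            rw [hstart, consume_cons_ge k _ _ k (by omega)]
            rfl
          · rw [show goA (lines[k] :: lines.drop (k + 1)) k none res
                  = goA (lines.drop (k + 1)) (k + 1) none res by
                simp only [goA]; rw [if_neg hs]]
            rw [(ih (k + 1) res hm).1]
            have hstart : startsOf (lines[k] :: lines.drop (k + 1)) k
                = startsOf (lines.drop (k + 1)) (k + 1) := by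
              simp only [startsOf]; rw [if_neg hs]
            rw [hstart]
            rw [consume_cursor_irrel (startsOf (lines.drop (k + 1)) (k + 1)) _ (k + 1) k
                  (fun s hsm => by have := startsOf_ge _ _ _ hsm; omega)
                  (fun s hsm => by have := startsOf_ge _ _ _ hsm; omega)]
        · -- in_block state
          intro st hst hd
          rw [hdrop]
          by_cases he : lines[k] = ""
          · rw [show goA (lines[k] :: lines.drop (k + 1)) k (some st) res
                  = goA (lines.drop (k + 1)) (k + 1) none (res ++ [((st : Int), (k : Int))]) by
                simp only [goA]; rw [if_pos he]]
            rw [(ih (k + 1) (res ++ [((st : Int), (k : Int))]) hm).1]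
            have hkE : k ∈ emptiesOf lines 0 := by
              rw [mem_empties_iff]
              exact ⟨hlt, by rw [List.getD_eq_getElem lines "?" hlt]; exact he⟩
            have hfind : (emptiesOf lines 0).find? (fun e => decide (st < e)) = some k :=
              find?_first st k _ (pairwise_emptiesOf lines 0) hkE hst hd
            have hstart : startsOf (lines.drop k) k
                = startsOf (lines.drop (k + 1)) (k + 1) := by
              rw [hdrop]; simp only [startsOf]
              rw [if_neg (by rw [he]; decide)]
            simp only [tailB, hfind, hstart, List.append_assoc, List.cons_append,
              List.nil_append]
          · rw [show goA (lines[k] :: lines.drop (k + 1)) k (some st) res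
                  = goA (lines.drop (k + 1)) (k + 1) (some st) res by
                simp only [goA]; rw [if_neg he]]
            have hknE : k ∉ emptiesOf lines 0 := by
              rw [mem_empties_iff]
              rintro ⟨_, hget⟩
              rw [List.getD_eq_getElem lines "?" hlt] at hget
              exact he hget
            have hd' : ∀ d ∈ emptiesOf lines 0, st < d → ¬ d < k + 1 := by
              intro d hdm hstd hdk
              by_cases hdk' : d < k
              · exact hd d hdm hstd hdk'
              · have : d = k := by omega
                exact hknE (this ▸ hdm)
            rw [(ih (k + 1) res hm).2 st (by omega) hd']
            -- tailB lines st (k+1) = tailB lines st k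
            cases hfind : (emptiesOf lines 0).find? (fun e => decide (st < e)) with
            | none => simp only [tailB, hfind]
            | some e =>
                simp only [tailB, hfind]
                have heE : e ∈ emptiesOf lines 0 := List.mem_of_find?_eq_some hfind
                have hste : st < e := by
                  have := List.find?_some hfind
                  simpa using this
                have hek : ¬ e < k + 1 := hd' e heE hste
                by_cases hs : (PySem.Str.startswith lines[k] "import " ||
                                PySem.Str.startswith lines[k] "from ") = true
                · have hstart : startsOf (lines.drop k) k
                      = k :: startsOf (lines.drop (k + 1)) (k + 1) := by
                    rw [hdrop]; simp only [startsOf]; rw [if_pos hs]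
                  rw [hstart, consume_cons_lt k _ _ (e + 1) (by omega)]
                · have hstart : startsOf (lines.drop k) k
                      = startsOf (lines.drop (k + 1)) (k + 1) := by
                    rw [hdrop]; simp only [startsOf]; rw [if_neg hs]
                  rw [hstart]
      · have hge : lines.length ≤ k := by omega
        have hdrop : lines.drop k = [] := List.drop_eq_nil_of_le hge
        constructor
        · rw [hdrop]; simp [goA, startsOf, consume]
        · intro st hst hd
          rw [hdrop]
          have hfind : (emptiesOf lines 0).find? (fun e => decide (st < e)) = none := by
            rw [List.find?_eq_none]
            intro e he
            have hlt' : e < lines.length := ((mem_empties_iff lines e).1 he).1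
            simp only [decide_eq_true_eq]
            intro hste
            exact hd e he hste (by omega)
          simp [goA, tailB, hfind]

-- ===== VERDICT (by name: the statement is the Claim_ definition above) =====
theorem get_import_block_indices_spec : Claim_equal_get_import_block_indices := by
  intro lines _
  unfold Spec_get_import_block_indices get_import_block_indices get_import_block_indices_alt
  have h := (main_inv lines lines.length 0 [] (by omega)).1
  simpa using h
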